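-- pv_equiv track=rewrite | github.com/selfreferencing/erdos-86-lean | verify_coverage.py | divisors_of_square
-- ===== SOURCE A (Python) =====
-- def factor(n):
--     """Return list of (prime, exponent) pairs."""
--     if n <= 1:
--         return []
--     factors = []
--     d = 2
--     while d * d <= n:
--         if n % d == 0:
--             e = 0
--             while n % d == 0:
--                 e += 1
--                 n //= d
--             factors.append((d, e))
--         d += 1 if d == 2 else 2
--     if n > 1:
--         factors.append((n, 1))
--     return factors
--
-- def divisors_of_square(n):
--     """Return all divisors of n²."""
--     facts = factor(n)
--     divs = [1]
--     for p, e in facts: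
--         new_divs = []
--         for d in divs:
--             power = 1
--             for i in range(2*e + 1):
--                 new_divs.append(d * power)
--                 power *= p
--         divs = new_divs
--     return sorted(divs)
-- ===== SOURCE B (Python) =====
-- def divisors_of_square(n):
--     """Return all divisors of n²."""
--     if n <= 1:
--         return [1]
--     divs_n = []
--     d = 1
--     while d * d <= n:
--         if n % d == 0:
--             divs_n.append(d)
--             if d != n // d:
--                 divs_n.append(n // d)
--         d += 1
--     return sorted({a * b for a in divs_n for b in divs_n})
-- ===== Notes on version B (the rewrite author's own statement) =====
-- stated objective: alternative
-- what changed: B replaces prime factorization plus combinatorial divisor generation by a sqrt(n) trial-division scan that collects the divisor pairs of n and then forms the set of pairwise products {a*b : a,b | n}, which is exactly the divisor set of n^2.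
import Mathlib
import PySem

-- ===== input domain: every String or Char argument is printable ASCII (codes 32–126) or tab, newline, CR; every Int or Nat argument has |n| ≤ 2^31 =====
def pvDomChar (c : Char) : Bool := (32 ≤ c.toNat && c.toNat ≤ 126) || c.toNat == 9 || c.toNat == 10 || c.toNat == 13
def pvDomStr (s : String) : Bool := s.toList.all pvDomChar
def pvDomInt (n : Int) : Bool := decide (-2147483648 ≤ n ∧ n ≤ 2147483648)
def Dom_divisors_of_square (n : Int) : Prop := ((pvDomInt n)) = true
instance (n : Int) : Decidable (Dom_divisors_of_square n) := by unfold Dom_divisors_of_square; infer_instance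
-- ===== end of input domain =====

-- B replaces A's prime-factorization-plus-combinatorial divisor generation by a sqrt(n) trial-division
-- scan collecting the divisor pairs of n, returning the sorted set of pairwise products of those divisors
-- (which is exactly the divisor set of n^2); an alternative algorithm of similar cost.


-- ===== PORT A =====
theorem pvExtractGo_dec (n d : Int) (h : 2 ≤ d ∧ 1 ≤ n ∧ PySem.Int.mod n d = 0) :
    (PySem.Int.floordiv n d).toNat < n.toNat := by
  obtain ⟨h2, h1, _⟩ := h
  rw [PySem.Int.floordiv_eq_ediv_of_pos (by omega)]
  have hq : 0 ≤ n / d := Int.ediv_nonneg (by omega) (by omega)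
  have he := Int.mul_ediv_add_emod n d
  have hr : 0 ≤ n % d := Int.emod_nonneg n (by omega)
  have hlt : n % d < d := Int.emod_lt_of_pos n (by omega)
  have : n / d < n := by nlinarith
  omega

def pvExtractGo (n d e : Int) : Int × Int :=
  if h : 2 ≤ d ∧ 1 ≤ n ∧ PySem.Int.mod n d = 0 then
    pvExtractGo (PySem.Int.floordiv n d) d (e + 1)
  else (e, n)
termination_by n.toNat
decreasing_by exact pvExtractGo_dec n d h

-- used only for the termination proof of pvFactorLoop below
theorem pvExtractGo_le (n d e : Int) (hd : 2 ≤ d) (hn : 1 ≤ n) :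
    (pvExtractGo n d e).2 ≤ n ∧ 1 ≤ (pvExtractGo n d e).2 := by
  fun_induction pvExtractGo n d e with
  | case1 n e h ih =>
      have hdvd : d ∣ n := (PySem.Int.mod_eq_zero_iff_dvd n d).mp h.2.2
      have hfd : PySem.Int.floordiv n d = n / d := PySem.Int.floordiv_eq_ediv_of_pos (by omega)
      have hnd : n = d * (n / d) := (Int.mul_ediv_cancel' hdvd).symm
      have hq1 : 1 ≤ n / d := by nlinarith [le_of_eq hnd]
      rw [hfd] at ih ⊢
      obtain ⟨ih1, ih2⟩ := ih hq1
      exact ⟨by nlinarith, ih2⟩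
  | case2 n e h => exact ⟨le_refl n, hn⟩

-- used only for the termination proof of pvFactorLoop below
theorem pvExtractGo_snd_lt (n d e : Int) (h2 : 2 ≤ d) (h1 : 1 ≤ n)
    (hdvd : PySem.Int.mod n d = 0) :
    2 * (pvExtractGo n d e).2 ≤ n ∧ 1 ≤ (pvExtractGo n d e).2 := by
  rw [pvExtractGo, dif_pos ⟨h2, h1, hdvd⟩]
  have hdvd' : d ∣ n := (PySem.Int.mod_eq_zero_iff_dvd n d).mp hdvd
  have hfd : PySem.Int.floordiv n d = n / d := PySem.Int.floordiv_eq_ediv_of_pos (by omega)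
  have hnd : n = d * (n / d) := (Int.mul_ediv_cancel' hdvd').symm
  have hq1 : 1 ≤ n / d := by nlinarith [le_of_eq hnd]
  rw [hfd]
  obtain ⟨ha, hb⟩ := pvExtractGo_le (n / d) d (e + 1) h2 hq1
  exact ⟨by nlinarith, hb⟩

theorem pvFactorLoop_dec1 (n d : Int) (h : d * d ≤ n ∧ 2 ≤ d ∧ 1 ≤ n)
    (hm : PySem.Int.mod n d = 0) :
    (2 * (pvExtractGo n d 0).2 - (d + if d = 2 then 1 else 2)).toNat < (2 * n - d).toNat := by
  obtain ⟨hdd, hd, hn⟩ := h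
  obtain ⟨ha, hb⟩ := pvExtractGo_snd_lt n d 0 hd hn hm
  have h2d : 2 * d ≤ n := by nlinarith
  split <;> omega

theorem pvFactorLoop_dec2 (n d : Int) (h : d * d ≤ n ∧ 2 ≤ d ∧ 1 ≤ n) :
    (2 * n - (d + if d = 2 then 1 else 2)).toNat < (2 * n - d).toNat := by
  obtain ⟨hdd, hd, hn⟩ := h
  have h2d : 2 * d ≤ n := by nlinarith
  split <;> omega

def pvFactorLoop (n d : Int) (acc : List (Int × Int)) : Int × List (Int × Int) :=
  if h : d * d ≤ n ∧ 2 ≤ d ∧ 1 ≤ n then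
    if hm : PySem.Int.mod n d = 0 then
      let r := pvExtractGo n d 0
      pvFactorLoop r.2 (d + if d = 2 then 1 else 2) (acc ++ [(d, r.1)])
    else
      pvFactorLoop n (d + if d = 2 then 1 else 2) acc
  else (n, acc)
termination_by (2 * n - d).toNat
decreasing_by
  · exact pvFactorLoop_dec1 n d h hm
  · exact pvFactorLoop_dec2 n d h

def pyFactor (n : Int) : List (Int × Int) :=
  if n ≤ 1 then []
  else
    let r := pvFactorLoop n 2 []
    if 1 < r.1 then r.2 ++ [(r.1, 1)] else r.2

def divisors_of_square (n : Int) : List Int :=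
  let facts := pyFactor n
  let divs := facts.foldl (fun divs pe =>
    divs.foldl (fun new_divs d =>
      ((PySem.List.pyRange 0 (2 * pe.2 + 1) 1).foldl
        (fun (st : List Int × Int) _i => (st.1 ++ [d * st.2], st.2 * pe.1))
        (new_divs, 1)).1) []) [1]
  PySem.List.sorted divs (fun x => x) false

-- ===== PORT B =====
theorem pvDivLoop_dec (n d : Int) (h : d * d ≤ n ∧ 1 ≤ d) :
    (n + 1 - (d + 1)).toNat < (n + 1 - d).toNat := by
  have h1 : 1 ≤ d := h.2
  have h2 : d * d ≤ n := h.1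
  have : d ≤ n := by nlinarith
  omega

def pvDivLoop (n d : Int) (acc : List Int) : List Int :=
  if h : d * d ≤ n ∧ 1 ≤ d then
    pvDivLoop n (d + 1)
      (acc ++ (if PySem.Int.mod n d = 0 then
                 [d] ++ (if d ≠ PySem.Int.floordiv n d then [PySem.Int.floordiv n d] else [])
               else []))
  else acc
termination_by (n + 1 - d).toNat
decreasing_by exact pvDivLoop_dec n d h

def divisors_of_square_alt (n : Int) : List Int :=
  if n ≤ 1 then [1]
  else
    let divs_n := pvDivLoop n 1 []
    PySem.List.sorted
      (PySem.Set.ofList (divs_n.flatMap (fun a => divs_n.map (fun b => a * b))))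
      (fun x => x) false

-- ===== PRECONDITION & SPEC =====
def Spec_divisors_of_square (n : Int) (out : List Int) : Prop := out = divisors_of_square_alt n
instance (n : Int) (out : List Int) : Decidable (Spec_divisors_of_square n out) := by unfold Spec_divisors_of_square; infer_instance

-- ===== CLAIM (what is proved, stated in full; the proofs are below) =====
def Claim_equal_divisors_of_square : Prop := ∀ (n : Int), Dom_divisors_of_square n → Spec_divisors_of_square n (divisors_of_square n)

-- ===== LEMMAS AND PROOFS =====
-- canonical strictly increasing list of positive divisors of m
def pvCanon (m : Int) : List Int :=
  (PySem.List.pyRange 1 (m + 1) 1).filter (fun x => decide (x ∣ m))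

theorem pvCanon_pairwise (m : Int) : (pvCanon m).Pairwise (· < ·) :=
  (PySem.List.pairwise_lt_pyRange_one 1 (m+1)).filter _

theorem pvCanon_nodup (m : Int) : (pvCanon m).Nodup :=
  (pvCanon_pairwise m).imp (fun h => ne_of_lt h)

theorem mem_pvCanon (m : Int) (hm : 1 ≤ m) (x : Int) :
    x ∈ pvCanon m ↔ 1 ≤ x ∧ x ∣ m := by
  simp only [pvCanon, List.mem_filter, PySem.List.mem_pyRange_one, decide_eq_true_eq]
  constructor
  · rintro ⟨⟨h1, _⟩, h3⟩; exact ⟨h1, h3⟩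
  · rintro ⟨h1, h2⟩
    exact ⟨⟨h1, by have := Int.le_of_dvd (by omega) h2; omega⟩, h2⟩

theorem sorted_eq_pvCanon (m : Int) (hm : 1 ≤ m) (L : List Int) (hnd : L.Nodup)
    (hmem : ∀ x, x ∈ L ↔ 1 ≤ x ∧ x ∣ m) :
    PySem.List.sorted L (fun x => x) false = pvCanon m := by
  apply PySem.List.sorted_eq_of_perm_of_pairwise_lt
  · exact (List.perm_ext_iff_of_nodup (pvCanon_nodup m) hnd).mpr
      (fun a => by rw [mem_pvCanon m hm, hmem])
  · exact pvCanon_pairwise m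

theorem pvDivLoop_mem (n d : Int) (acc : List Int) :
    1 ≤ d → ∀ x, (x ∈ pvDivLoop n d acc ↔
      x ∈ acc ∨ ∃ j, d ≤ j ∧ j * j ≤ n ∧ j ∣ n ∧ (x = j ∨ x = n / j)) := by
  fun_induction pvDivLoop n d acc with
  | case1 d acc h ih =>
      intro hd x
      have hdn : d ∣ n ↔ PySem.Int.mod n d = 0 := (PySem.Int.mod_eq_zero_iff_dvd n d).symm
      simp only [dite_eq_ite] at ih
      rw [ih (by omega) x]
      have hfd : PySem.Int.floordiv n d = n / d := PySem.Int.floordiv_eq_ediv_of_pos (by omega)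
      constructor
      · rintro (hx | ⟨j, hj1, hj2, hj3, hj4⟩)
        · simp only [List.mem_append] at hx
          rcases hx with hx | hx
          · exact Or.inl hx
          · -- x among the newly appended elements for index d
            right
            refine ⟨d, le_refl d, h.1, ?_, ?_⟩
            · by_contra hnd
              rw [(PySem.Int.mod_eq_zero_iff_dvd n d).symm] at hnd
              simp [hnd] at hx
            · have hdvd : PySem.Int.mod n d = 0 := by
                by_contra hnd; simp [hnd] at hx
              simp only [hdvd, if_pos, List.mem_append, hfd] at hx
              rcases hx with hx | hx
              · simp at hx; exact Or.inl hx
              · split at hx <;> simp_all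
        · exact Or.inr ⟨j, by omega, hj2, hj3, hj4⟩
      · rintro (hx | ⟨j, hj1, hj2, hj3, hj4⟩)
        · exact Or.inl (by simp [hx])
        · rcases eq_or_lt_of_le hj1 with heq | hlt
          · subst heq
            left
            have hm : PySem.Int.mod n d = 0 := (PySem.Int.mod_eq_zero_iff_dvd n d).mpr hj3
            have hx : x = d ∨ (d ≠ n / d ∧ x = n / d) := by
              rcases hj4 with rfl | rfl
              · exact Or.inl rfl
              · by_cases hdq : d = n / d
                · exact Or.inl hdq.symm
                · exact Or.inr ⟨hdq, rfl⟩
            rcases hx with rfl | ⟨hdq, rfl⟩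
            · simp [hm, hfd]
            · simp [hm, hfd, hdq]
          · exact Or.inr ⟨j, by omega, hj2, hj3, hj4⟩
  | case2 d acc h =>
      intro hd x
      simp only [iff_self_or]
      rintro ⟨j, hj1, hj2, hj3, hj4⟩
      have : ¬ (d * d ≤ n) := by tauto
      nlinarith

theorem pvDivLoop_full (n : Int) (hn : 1 ≤ n) (x : Int) :
    x ∈ pvDivLoop n 1 [] ↔ 1 ≤ x ∧ x ∣ n := by
  rw [pvDivLoop_mem n 1 [] (le_refl 1) x]
  simp only [List.not_mem_nil, false_or]
  constructor
  · rintro ⟨j, hj1, hj2, hj3, hj4⟩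
    have hjn : n = j * (n / j) := (Int.mul_ediv_cancel' hj3).symm
    have hq1 : 1 ≤ n / j := by nlinarith [le_of_eq hjn]
    rcases hj4 with rfl | rfl
    · exact ⟨hj1, hj3⟩
    · exact ⟨hq1, ⟨j, by linarith [hjn]⟩⟩
  · rintro ⟨hx1, hx2⟩
    by_cases hxx : x * x ≤ n
    · exact ⟨x, hx1, hxx, hx2, Or.inl rfl⟩
    · refine ⟨n / x, ?_, ?_, ?_, Or.inr ?_⟩
      · have hxn : n = x * (n / x) := (Int.mul_ediv_cancel' hx2).symm
        nlinarith
      · have hxn : n = x * (n / x) := (Int.mul_ediv_cancel' hx2).symm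
        have h1 : 1 ≤ n / x := by nlinarith
        have h2 : n / x < x := by nlinarith
        nlinarith
      · exact ⟨x, (Int.ediv_mul_cancel hx2).symm⟩
      · have hxn : x * (n / x) = n := Int.mul_ediv_cancel' hx2
        generalize hq : n / x = q at hxn ⊢
        have hne : q ≠ 0 := by rintro rfl; simp at hxn; omega
        rw [← hxn, Int.mul_ediv_cancel _ hne]

theorem mem_products_iff (n : Int) (hn : 2 ≤ n) (x : Int) :
    (∃ a, (1 ≤ a ∧ a ∣ n) ∧ ∃ b, (1 ≤ b ∧ b ∣ n) ∧ x = a * b) ↔ 1 ≤ x ∧ x ∣ n * n := by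
  constructor
  · rintro ⟨a, ⟨ha1, ha2⟩, b, ⟨hb1, hb2⟩, rfl⟩
    exact ⟨by nlinarith, mul_dvd_mul ha2 hb2⟩
  · rintro ⟨hx1, hx2⟩
    obtain ⟨u, v, hu, hv, huv⟩ := exists_dvd_and_dvd_of_dvd_mul hx2
    have hu0 : u ≠ 0 := by rintro rfl; simp at huv; omega
    have hv0 : v ≠ 0 := by rintro rfl; simp at huv; omega
    refine ⟨(u.natAbs : Int), ⟨by have := Int.natAbs_pos.mpr hu0; omega, Int.natAbs_dvd.mpr hu⟩,
           (v.natAbs : Int), ⟨by have := Int.natAbs_pos.mpr hv0; omega, Int.natAbs_dvd.mpr hv⟩, ?_⟩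
    have : ((u.natAbs : Int) * (v.natAbs : Int)) = (u * v).natAbs := by
      rw [Int.natAbs_mul]; push_cast; ring
    rw [this, ← huv, Int.natAbs_of_nonneg (by omega)]

theorem int_prime_of_dvd_no_small (n d : Int) (hd : 2 ≤ d) (hn : 1 ≤ n) (hdvd : d ∣ n)
    (hsmall : ∀ q : Int, 2 ≤ q → Prime q → q < d → ¬ q ∣ n) : Prime d := by
  set q : ℕ := d.toNat.minFac with hq
  have hd2 : d.toNat ≠ 1 := by omega
  have hqp : q.Prime := Nat.minFac_prime hd2
  have hqd : (q : Int) ∣ d := by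
    have h1 : (q : Int) ∣ (d.toNat : Int) := Int.natCast_dvd_natCast.mpr (Nat.minFac_dvd _)
    rwa [Int.toNat_of_nonneg (by omega)] at h1
  have hqle : (q : Int) ≤ d := Int.le_of_dvd (by omega) hqd
  have hq2 : (2 : Int) ≤ (q : Int) := by exact_mod_cast hqp.two_le
  have hqprime : Prime (q : Int) := Nat.prime_iff_prime_int.mp hqp
  rcases lt_or_eq_of_le hqle with hlt | heq
  · exact absurd (dvd_trans hqd hdvd) (hsmall _ hq2 hqprime hlt)
  · rwa [← heq]

theorem int_prime_of_no_small_sq (n d : Int) (hn : 2 ≤ n) (hd : 0 ≤ d) (hlt : n < d * d)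
    (hsmall : ∀ q : Int, 2 ≤ q → Prime q → q < d → ¬ q ∣ n) : Prime n := by
  by_contra hnp
  set q : ℕ := n.toNat.minFac with hq
  have hn1 : n.toNat ≠ 1 := by omega
  have hqp : q.Prime := Nat.minFac_prime hn1
  have hqn : (q : Int) ∣ n := by
    have h1 : (q : Int) ∣ (n.toNat : Int) := Int.natCast_dvd_natCast.mpr (Nat.minFac_dvd _)
    rwa [Int.toNat_of_nonneg (by omega)] at h1
  have hnatnp : ¬ n.toNat.Prime := by
    intro hp
    apply hnp
    have : Prime ((n.toNat : Int)) := Nat.prime_iff_prime_int.mp hp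
    rwa [Int.toNat_of_nonneg (by omega)] at this
  have hsq : q ^ 2 ≤ n.toNat := Nat.minFac_sq_le_self (by omega) hnatnp
  have hsq' : (q : Int) * (q : Int) ≤ n := by
    have := (Nat.cast_le (α := Int)).mpr hsq
    push_cast at this
    rw [Int.toNat_of_nonneg (by omega)] at this
    nlinarith
  have hq0 : (0:Int) ≤ (q:Int) := by positivity
  have hqd : (q : Int) < d := by nlinarith
  exact hsmall _ (by exact_mod_cast hqp.two_le) (Nat.prime_iff_prime_int.mp hqp) hqd hqn

theorem pvExtractGo_spec (n d e : Int) (hd : 2 ≤ d) (hn : 1 ≤ n) :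
    1 ≤ (pvExtractGo n d e).2 ∧ ¬ d ∣ (pvExtractGo n d e).2 ∧
    ∃ k : ℕ, (pvExtractGo n d e).1 = e + k ∧ n = d ^ k * (pvExtractGo n d e).2 ∧
      (d ∣ n → 1 ≤ k) := by
  fun_induction pvExtractGo n d e with
  | case1 n e h ih =>
      have hdvd : d ∣ n := (PySem.Int.mod_eq_zero_iff_dvd n d).mp h.2.2
      have hfd : PySem.Int.floordiv n d = n / d := PySem.Int.floordiv_eq_ediv_of_pos (by omega)
      have hnd : n = d * (n / d) := (Int.mul_ediv_cancel' hdvd).symm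
      have hq1 : 1 ≤ n / d := by nlinarith [le_of_eq hnd]
      rw [hfd] at ih ⊢
      obtain ⟨ih1, ih2, k, ihk, ihprod, _⟩ := ih hq1
      refine ⟨ih1, ih2, k + 1, by push_cast; omega, ?_, by omega⟩
      rw [pow_succ]
      calc n = d * (n / d) := hnd
    _ = d * (d ^ k * (pvExtractGo (n / d) d (e+1)).2) := by rw [← ihprod]
    _ = d ^ k * d * (pvExtractGo (n / d) d (e+1)).2 := by ring
  | case2 n e h =>
      have hnd : ¬ d ∣ n := by
        intro hdvd
        exact h ⟨hd, hn, (PySem.Int.mod_eq_zero_iff_dvd n d).mpr hdvd⟩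
      exact ⟨hn, hnd, 0, by simp, by simp, fun hc => absurd hc hnd⟩

def pvFProd (fs : List (Int × Int)) : Int := (fs.map (fun pe => pe.1 ^ pe.2.toNat)).prod

theorem pvFProd_nil : pvFProd [] = 1 := rfl

theorem pvFProd_cons (pe : Int × Int) (fs : List (Int × Int)) :
    pvFProd (pe :: fs) = pe.1 ^ pe.2.toNat * pvFProd fs := by
  simp [pvFProd]

theorem pvFProd_append (a b : List (Int × Int)) :
    pvFProd (a ++ b) = pvFProd a * pvFProd b := by
  simp [pvFProd]

theorem int_even_prime (q : Int) (h2 : (2:Int) ∣ q) (hq : Prime q) (hq2 : 2 ≤ q) : q = 2 := by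
  have := (Int.prime_iff_natAbs_prime.mp hq)
  have h2' : 2 ∣ q.natAbs := by
    have := Int.natAbs_dvd_natAbs.mpr h2
    simpa using this
  rcases (Nat.Prime.eq_one_or_self_of_dvd this 2 h2') with h | h
  · omega
  · have : q.natAbs = 2 := h.symm
    omega

theorem pvFactorLoop_spec (n d : Int) (acc : List (Int × Int)) :
    1 ≤ n → 2 ≤ d → (d = 2 ∨ ¬ (2:Int) ∣ d) →
    (∀ q : Int, 2 ≤ q → Prime q → q < d → ¬ q ∣ n) →
    ∃ Δ, (pvFactorLoop n d acc).2 = acc ++ Δ ∧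
      pvFProd Δ * (pvFactorLoop n d acc).1 = n ∧
      1 ≤ (pvFactorLoop n d acc).1 ∧
      Δ.Pairwise (fun a b => a.1 < b.1) ∧
      (∀ pe ∈ Δ, Prime pe.1 ∧ d ≤ pe.1 ∧ 1 ≤ pe.2) ∧
      ((pvFactorLoop n d acc).1 = 1 ∨
        (Prime (pvFactorLoop n d acc).1 ∧ d ≤ (pvFactorLoop n d acc).1 ∧
         ∀ pe ∈ Δ, pe.1 < (pvFactorLoop n d acc).1)) := by
  fun_induction pvFactorLoop n d acc with
  | case1 n d acc h hm r ih =>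
      intro hn hd hodd hsmall
      simp only [dite_eq_ite] at ih ⊢
      have hdvd : d ∣ n := (PySem.Int.mod_eq_zero_iff_dvd n d).mp hm
      obtain ⟨hr1, hr2, k, hrk, hrprod, hrkge⟩ := pvExtractGo_spec n d 0 hd hn
      have hrdef : pvExtractGo n d 0 = r := rfl
      rw [hrdef] at hr1 hr2 hrk hrprod
      have hk1 : 1 ≤ k := hrkge hdvd
      have hdprime : Prime d := int_prime_of_dvd_no_small n d hd (by omega) hdvd hsmall
      set d' : Int := d + if d = 2 then 1 else 2 with hd'
      have hd'2 : 2 ≤ d' := by rw [hd']; split <;> omega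
      have hodd' : d' = 2 ∨ ¬ (2:Int) ∣ d' := by
        rw [hd']
        rcases hodd with h2 | hno
        · subst h2; norm_num
        · right; split
          · omega
          · omega
      have hdvd_n : r.2 ∣ n := ⟨d ^ k, by rw [hrprod]; ring⟩
      have hsmall' : ∀ q : Int, 2 ≤ q → Prime q → q < d' → ¬ q ∣ r.2 := by
        intro q hq2 hqp hqd' hqdvd
        rcases lt_trichotomy q d with hlt | heq | hgt
        · exact hsmall q hq2 hqp hlt (dvd_trans hqdvd hdvd_n)
        · exact hr2 (by rwa [heq] at hqdvd)
        · -- d < q < d'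
          rcases hodd with h2 | hno
          · subst h2; rw [hd'] at hqd'; simp at hqd'; omega
          · have hq_eq : q = d + 1 := by rw [hd'] at hqd'; split at hqd' <;> omega
            have hq_even : (2:Int) ∣ q := by omega
            have : q = 2 := int_even_prime q hq_even hqp hq2
            omega
      obtain ⟨Δ', hΔeq, hΔprod, hres1, hΔpw, hΔmem, hΔlast⟩ := ih hr1 hd'2 hodd' hsmall'
      refine ⟨(d, r.1) :: Δ', by simpa using hΔeq, ?_, hres1, ?_, ?_, ?_⟩
      · rw [pvFProd_cons]
        have hkt : (r.1).toNat = k := by omega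
        simp only [hkt]
        calc d ^ k * pvFProd Δ' * (pvFactorLoop r.2 d' (acc ++ [(d, r.1)])).1
            = d ^ k * (pvFProd Δ' * (pvFactorLoop r.2 d' (acc ++ [(d, r.1)])).1) := by ring
          _ = d ^ k * r.2 := by rw [hΔprod]
          _ = n := hrprod.symm
      · exact List.pairwise_cons.mpr ⟨fun pe hpe => by have := (hΔmem pe hpe).2.1; omega, hΔpw⟩
      · intro pe hpe
        rcases List.mem_cons.mp hpe with rfl | hpe'
        · exact ⟨hdprime, le_refl d, by omega⟩
        · obtain ⟨a, b, c⟩ := hΔmem pe hpe'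
          exact ⟨a, by omega, c⟩
      · rcases hΔlast with h1 | ⟨hp, hle, hall⟩
        · exact Or.inl h1
        · refine Or.inr ⟨hp, by omega, ?_⟩
          intro pe hpe
          rcases List.mem_cons.mp hpe with rfl | hpe'
          · omega
          · exact hall pe hpe'
  | case2 n d acc h hm ih =>
      intro hn hd hodd hsmall
      simp only [dite_eq_ite] at ih ⊢
      have hndvd : ¬ d ∣ n := fun hdvd => hm ((PySem.Int.mod_eq_zero_iff_dvd n d).mpr hdvd)
      set d' : Int := d + if d = 2 then 1 else 2 with hd'
      have hd'2 : 2 ≤ d' := by rw [hd']; split <;> omega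
      have hodd' : d' = 2 ∨ ¬ (2:Int) ∣ d' := by
        rw [hd']
        rcases hodd with h2 | hno
        · subst h2; norm_num
        · right; split
          · omega
          · omega
      have hsmall' : ∀ q : Int, 2 ≤ q → Prime q → q < d' → ¬ q ∣ n := by
        intro q hq2 hqp hqd' hqdvd
        rcases lt_trichotomy q d with hlt | heq | hgt
        · exact hsmall q hq2 hqp hlt hqdvd
        · exact hndvd (heq ▸ hqdvd)
        · rcases hodd with h2 | hno
          · subst h2; rw [hd'] at hqd'; simp at hqd'; omega
          · have hq_eq : q = d + 1 := by rw [hd'] at hqd'; split at hqd' <;> omega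
            have hq_even : (2:Int) ∣ q := by omega
            have : q = 2 := int_even_prime q hq_even hqp hq2
            omega
      obtain ⟨Δ', hΔeq, hΔprod, hres1, hΔpw, hΔmem, hΔlast⟩ := ih hn hd'2 hodd' hsmall'
      refine ⟨Δ', hΔeq, hΔprod, hres1, hΔpw, ?_, ?_⟩
      · intro pe hpe
        obtain ⟨a, b, c⟩ := hΔmem pe hpe
        exact ⟨a, by omega, c⟩
      · rcases hΔlast with h1 | ⟨hp, hle, hall⟩
        · exact Or.inl h1
        · exact Or.inr ⟨hp, by omega, hall⟩
  | case3 n d acc h =>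
      intro hn hd hodd hsmall
      have hlt : n < d * d := by
        by_contra hc
        exact h ⟨by omega, hd, hn⟩
      refine ⟨[], by simp, by simp [pvFProd_nil], hn, List.Pairwise.nil, by simp, ?_⟩
      rcases eq_or_lt_of_le hn with h1 | h2
      · exact Or.inl h1.symm
      · have hprime : Prime n := int_prime_of_no_small_sq n d (by omega) (by omega) hlt hsmall
        refine Or.inr ⟨hprime, ?_, by simp⟩
        by_contra hc
        exact hsmall n (by omega) hprime (by omega) dvd_rfl

theorem pyFactor_spec (n : Int) (hn : 2 ≤ n) :
    (pyFactor n).Pairwise (fun a b => a.1 < b.1) ∧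
    (∀ pe ∈ pyFactor n, Prime pe.1 ∧ 2 ≤ pe.1 ∧ 1 ≤ pe.2) ∧
    pvFProd (pyFactor n) = n := by
  obtain ⟨Δ, hΔeq, hΔprod, hres1, hΔpw, hΔmem, hΔlast⟩ :=
    pvFactorLoop_spec n 2 [] (by omega) (le_refl 2) (Or.inl rfl)
      (fun q hq2 _ hq1 _ => by omega)
  have hpf : pyFactor n = if 1 < (pvFactorLoop n 2 []).1
      then (pvFactorLoop n 2 []).2 ++ [((pvFactorLoop n 2 []).1, 1)]
      else (pvFactorLoop n 2 []).2 := by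
    have hn1 : ¬ n ≤ 1 := by omega
    simp [pyFactor, hn1]
  rw [List.nil_append] at hΔeq
  rcases hΔlast with h1 | ⟨hp, hle, hall⟩
  · rw [hpf, if_neg (by omega), hΔeq]
    refine ⟨hΔpw, fun pe hpe => ?_, ?_⟩
    · obtain ⟨a, b, c⟩ := hΔmem pe hpe
      exact ⟨a, b, c⟩
    · rw [← hΔprod, h1, mul_one]
  · have hgt : 1 < (pvFactorLoop n 2 []).1 := by
      omega
    rw [hpf, if_pos hgt, hΔeq]
    refine ⟨?_, ?_, ?_⟩
    · apply List.pairwise_append.mpr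
      refine ⟨hΔpw, List.pairwise_singleton _ _, ?_⟩
      intro a ha b hb
      simp at hb
      subst hb
      exact hall a ha
    · intro pe hpe
      rcases List.mem_append.mp hpe with hpe' | hpe'
      · obtain ⟨a, b, c⟩ := hΔmem pe hpe'
        exact ⟨a, b, c⟩
      · simp at hpe'
        subst hpe'
        exact ⟨hp, hle, by norm_num⟩
    · have h1 : pvFProd [((pvFactorLoop n 2 []).1, 1)] = (pvFactorLoop n 2 []).1 := by
        simp [pvFProd]
      rw [pvFProd_append, h1]
      exact hΔprod

theorem dvd_coprime_pow_iff (p P : Int) (hp : Prime p) (hp2 : 2 ≤ p) (hP : 1 ≤ P)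
    (hpP : ¬ p ∣ P) (k : ℕ) (x : Int) :
    (1 ≤ x ∧ x ∣ P * p ^ k) ↔ ∃ i ≤ k, ∃ d2, 1 ≤ d2 ∧ d2 ∣ P ∧ x = d2 * p ^ i := by
  constructor
  · intro hx
    induction k generalizing x with
    | zero =>
        refine ⟨0, le_refl 0, x, hx.1, ?_, by ring⟩
        simpa using hx.2
    | succ k ih =>
        by_cases hpx : p ∣ x
        · obtain ⟨y, hy⟩ := hpx
          have hy1 : 1 ≤ y := by nlinarith [hx.1, hy]
          have hyd : y ∣ P * p ^ k := by
            have h1 : p * y ∣ p * (P * p ^ k) := by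
              rw [← hy]
              have : P * p ^ (k + 1) = p * (P * p ^ k) := by ring
              rw [← this]
              exact hx.2
            exact (mul_dvd_mul_iff_left (by omega : p ≠ 0)).mp h1
          obtain ⟨i, hik, d2, hd1, hd2, hd3⟩ := ih y ⟨hy1, hyd⟩
          exact ⟨i + 1, by omega, d2, hd1, hd2, by rw [hy, hd3]; ring⟩
        · have hcop : IsCoprime x (p ^ (k+1)) :=
            (((hp.coprime_iff_not_dvd).mpr hpx).symm).pow_right
          exact ⟨0, by omega, x, hx.1, hcop.dvd_of_dvd_mul_right hx.2, by ring⟩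
  · rintro ⟨i, hik, d2, hd1, hd2, rfl⟩
    have hpi : (1:Int) ≤ p ^ i := one_le_pow₀ (by omega)
    exact ⟨by nlinarith, mul_dvd_mul hd2 (pow_dvd_pow p hik)⟩

theorem mul_pow_inj (p : Int) (hp2 : 2 ≤ p) (hp : Prime p) :
    ∀ (i j : ℕ) (d d' : Int), 1 ≤ d → 1 ≤ d' → ¬ p ∣ d → ¬ p ∣ d' →
      d * p ^ i = d' * p ^ j → d = d' ∧ i = j := by
  intro i
  induction i with
  | zero =>
      intro j d d' hd1 hd1' hpd hpd' heq
      cases j with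
      | zero => simpa using heq
      | succ j =>
          exfalso
          apply hpd
          rw [show d = d' * p ^ (j+1) by simpa using heq]
          exact Dvd.dvd.mul_left ⟨p ^ j, by ring⟩ d'
  | succ i ih =>
      intro j d d' hd1 hd1' hpd hpd' heq
      cases j with
      | zero =>
          exfalso
          apply hpd'
          rw [show d' = d * p ^ (i+1) by simpa using heq.symm]
          exact Dvd.dvd.mul_left ⟨p ^ i, by ring⟩ d
      | succ j =>
          have heq' : d * p ^ i = d' * p ^ j := by
            have h1 : d * p ^ i * p = d' * p ^ j * p := by
              rw [show d * p ^ i * p = d * p ^ (i+1) by ring,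
                  show d' * p ^ j * p = d' * p ^ (j+1) by ring]
              exact heq
            exact mul_right_cancel₀ (by omega : p ≠ 0) h1
          obtain ⟨ha, hb⟩ := ih j d d' hd1 hd1' hpd hpd' heq'
          exact ⟨ha, by omega⟩

theorem foldl_power_shape (d p : Int) (l : List Int) (nd : List Int) (pw : Int) :
    l.foldl (fun (st : List Int × Int) _i => (st.1 ++ [d * st.2], st.2 * p)) (nd, pw)
      = (nd ++ (List.range l.length).map (fun i => d * (pw * p ^ i)), pw * p ^ l.length) := by
  induction l generalizing nd pw with
  | nil => simp
  | cons a t ih =>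
      rw [List.foldl_cons, ih]
      simp only [Prod.mk.injEq]
      constructor
      · rw [List.length_cons, List.range_succ_eq_map, List.map_cons, List.map_map,
            List.append_assoc, List.singleton_append]
        congr 1
        congr 1
        · ring
        · apply List.map_congr_left
          intro i _
          show d * (pw * p * p ^ i) = d * (pw * p ^ (i + 1))
          ring
      · rw [List.length_cons]
        ring

theorem foldl_append_flatMap {α β : Type} (l : List α) (f : α → List β) (init : List β) :
    l.foldl (fun acc x => acc ++ f x) init = init ++ l.flatMap f := by
  induction l generalizing init with
  | nil => simp
  | cons a t ih => simp [ih]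

theorem pvFoldlExt {α β : Type} (f g : β → α → β) (l : List α)
    (h : ∀ b, ∀ a ∈ l, f b a = g b a) : ∀ init, l.foldl f init = l.foldl g init := by
  induction l with
  | nil => intro init; rfl
  | cons a t ih =>
      intro init
      rw [List.foldl_cons, List.foldl_cons, h init a (by simp)]
      exact ih (fun b x hx => h b x (by simp [hx])) _

theorem step_shape (p e : Int) (divs : List Int) :
    divs.foldl (fun new_divs d =>
      ((PySem.List.pyRange 0 (2 * e + 1) 1).foldl
        (fun (st : List Int × Int) _i => (st.1 ++ [d * st.2], st.2 * p))
        (new_divs, 1)).1) []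
    = divs.flatMap (fun d => (List.range (2 * e + 1).toNat).map (fun i => d * p ^ i)) := by
  have hstep : ∀ (nd : List Int) (d : Int),
      ((PySem.List.pyRange 0 (2 * e + 1) 1).foldl
        (fun (st : List Int × Int) _i => (st.1 ++ [d * st.2], st.2 * p))
        (nd, 1)).1
      = nd ++ (List.range (2 * e + 1).toNat).map (fun i => d * p ^ i) := by
    intro nd d
    rw [foldl_power_shape]
    have hlen : (PySem.List.pyRange 0 (2 * e + 1) 1).length = (2 * e + 1).toNat := by
      rw [PySem.List.length_pyRange_one]
      omega
    rw [hlen]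
    dsimp only
    congr 1
    apply List.map_congr_left
    intro i _
    ring
  calc divs.foldl (fun new_divs d =>
      ((PySem.List.pyRange 0 (2 * e + 1) 1).foldl
        (fun (st : List Int × Int) _i => (st.1 ++ [d * st.2], st.2 * p))
        (new_divs, 1)).1) []
      = divs.foldl (fun nd d => nd ++ (List.range (2 * e + 1).toNat).map (fun i => d * p ^ i)) [] := by
        apply pvFoldlExt
        intro b a _
        exact hstep b a
    _ = divs.flatMap (fun d => (List.range (2 * e + 1).toNat).map (fun i => d * p ^ i)) := by
        rw [foldl_append_flatMap]; simp

theorem step_mem_nodup (p e P : Int) (hp : Prime p) (hp2 : 2 ≤ p) (he : 1 ≤ e)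
    (hP : 1 ≤ P) (hpP : ¬ p ∣ P) (L : List Int) (hnd : L.Nodup)
    (hmem : ∀ x, x ∈ L ↔ 1 ≤ x ∧ x ∣ P) :
    (L.flatMap (fun d => (List.range (2 * e + 1).toNat).map (fun i => d * p ^ i))).Nodup ∧
    ∀ x, x ∈ L.flatMap (fun d => (List.range (2 * e + 1).toNat).map (fun i => d * p ^ i)) ↔
      1 ≤ x ∧ x ∣ P * p ^ (2 * e).toNat := by
  have hnotp : ∀ d ∈ L, ¬ p ∣ d := by
    intro d hd hpd
    exact hpP (dvd_trans hpd ((hmem d).mp hd).2)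
  constructor
  · apply List.nodup_flatMap.mpr
    constructor
    · intro d hd
      apply List.Nodup.map _ (List.nodup_range)
      intro i j hij
      have h1 : 1 ≤ d := ((hmem d).mp hd).1
      exact (mul_pow_inj p hp2 hp i j d d h1 h1 (hnotp d hd) (hnotp d hd) hij).2
    · apply hnd.imp_of_mem
      intro a b ha hb hab
      rw [Function.onFun]
      rw [List.disjoint_left]
      intro x hxa hxb
      obtain ⟨i, _, hi⟩ := List.mem_map.mp hxa
      obtain ⟨j, _, hj⟩ := List.mem_map.mp hxb
      have h1a : 1 ≤ a := ((hmem a).mp ha).1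
      have h1b : 1 ≤ b := ((hmem b).mp hb).1
      exact hab (mul_pow_inj p hp2 hp i j a b h1a h1b (hnotp a ha) (hnotp b hb)
        (by rw [hi, hj])).1
  · intro x
    rw [dvd_coprime_pow_iff p P hp hp2 hP hpP (2 * e).toNat x]
    simp only [List.mem_flatMap, List.mem_map, List.mem_range]
    constructor
    · rintro ⟨d, hd, i, hilt, rfl⟩
      obtain ⟨h1, h2⟩ := (hmem d).mp hd
      exact ⟨i, by omega, d, h1, h2, rfl⟩
    · rintro ⟨i, hik, d2, h1, h2, rfl⟩
      exact ⟨d2, (hmem d2).mpr ⟨h1, h2⟩, i, by omega, rfl⟩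

theorem fold_divs_spec :
    ∀ (fs : List (Int × Int)) (L0 : List Int) (P0 : Int),
      1 ≤ P0 → L0.Nodup → (∀ x, x ∈ L0 ↔ 1 ≤ x ∧ x ∣ P0 * P0) →
      fs.Pairwise (fun a b => a.1 < b.1) →
      (∀ pe ∈ fs, Prime pe.1 ∧ 2 ≤ pe.1 ∧ 1 ≤ pe.2 ∧ ¬ pe.1 ∣ P0) →
      (fs.foldl (fun divs pe =>
        divs.foldl (fun new_divs d =>
          ((PySem.List.pyRange 0 (2 * pe.2 + 1) 1).foldl
            (fun (st : List Int × Int) _i => (st.1 ++ [d * st.2], st.2 * pe.1))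
            (new_divs, 1)).1) []) L0).Nodup ∧
      ∀ x, x ∈ (fs.foldl (fun divs pe =>
        divs.foldl (fun new_divs d =>
          ((PySem.List.pyRange 0 (2 * pe.2 + 1) 1).foldl
            (fun (st : List Int × Int) _i => (st.1 ++ [d * st.2], st.2 * pe.1))
            (new_divs, 1)).1) []) L0) ↔
        1 ≤ x ∧ x ∣ (P0 * pvFProd fs) * (P0 * pvFProd fs) := by
  intro fs
  induction fs with
  | nil =>
      intro L0 P0 hP0 hnd hmem _ _
      refine ⟨hnd, fun x => ?_⟩
      rw [pvFProd_nil]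
      simpa using hmem x
  | cons pe fs ih =>
      intro L0 P0 hP0 hnd hmem hpw hprops
      obtain ⟨hp, hp2, he1, hpP0⟩ := hprops pe (by simp)
      have hpPP : ¬ pe.1 ∣ P0 * P0 := by
        intro hc
        rcases (hp.dvd_mul).mp hc with h | h
        · exact hpP0 h
        · exact hpP0 h
      obtain ⟨hnd1, hmem1⟩ := step_mem_nodup pe.1 pe.2 (P0 * P0) hp hp2 he1
        (by nlinarith) hpPP L0 hnd hmem
      have het : (2 * pe.2).toNat = pe.2.toNat + pe.2.toNat := by omega
      have hmem1' : ∀ x,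
          x ∈ L0.flatMap (fun d => (List.range (2 * pe.2 + 1).toNat).map (fun i => d * pe.1 ^ i)) ↔
          1 ≤ x ∧ x ∣ (P0 * pe.1 ^ pe.2.toNat) * (P0 * pe.1 ^ pe.2.toNat) := by
        intro x
        rw [hmem1 x]
        have : P0 * P0 * pe.1 ^ (2 * pe.2).toNat
            = (P0 * pe.1 ^ pe.2.toNat) * (P0 * pe.1 ^ pe.2.toNat) := by
          rw [het, pow_add]
          ring
        rw [this]
      rw [List.foldl_cons, step_shape pe.1 pe.2 L0]
      have hppow : (1:Int) ≤ pe.1 ^ pe.2.toNat := one_le_pow₀ (by omega)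
      have hres := ih (L0.flatMap (fun d => (List.range (2 * pe.2 + 1).toNat).map
          (fun i => d * pe.1 ^ i))) (P0 * pe.1 ^ pe.2.toNat)
        (by nlinarith) hnd1 hmem1' (List.pairwise_cons.mp hpw).2 ?_
      · obtain ⟨ha, hb⟩ := hres
        refine ⟨ha, fun x => ?_⟩
        rw [hb x, pvFProd_cons]
        have : P0 * (pe.1 ^ pe.2.toNat * pvFProd fs)
            = P0 * pe.1 ^ pe.2.toNat * pvFProd fs := by ring
        rw [this]
      · intro q hq
        obtain ⟨hqp, hq2, hqe, hqP0⟩ := hprops q (by simp [hq])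
        refine ⟨hqp, hq2, hqe, ?_⟩
        intro hc
        rcases (hqp.dvd_mul).mp hc with h | h
        · exact hqP0 h
        · have hqdp : q.1 ∣ pe.1 := hqp.dvd_of_dvd_pow h
          have hle : q.1 ≤ pe.1 := Int.le_of_dvd (by omega) hqdp
          have hlt : pe.1 < q.1 := (List.pairwise_cons.mp hpw).1 q hq
          omega

theorem main_eq (n : Int) : divisors_of_square n = divisors_of_square_alt n := by
  by_cases hn : n ≤ 1
  · have hA : pyFactor n = [] := by simp [pyFactor, hn]
    rw [divisors_of_square, divisors_of_square_alt]
    simp only [hA, List.foldl_nil, if_pos hn]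
    apply PySem.List.sorted_eq_self_of_pairwise
    exact List.pairwise_singleton _ _
  · have hn2 : 2 ≤ n := by omega
    obtain ⟨hpw, hprops, hprod⟩ := pyFactor_spec n hn2
    have hbase : ∀ x : Int, x ∈ [(1:Int)] ↔ 1 ≤ x ∧ x ∣ 1 * 1 := by
      intro x
      simp only [List.mem_singleton, one_mul]
      constructor
      · rintro rfl; exact ⟨le_refl 1, dvd_refl 1⟩
      · rintro ⟨h1, h2⟩
        exact Int.eq_one_of_dvd_one (by omega) h2
    obtain ⟨hndA, hmemA⟩ := fold_divs_spec (pyFactor n) [1] 1 (le_refl 1)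
      (List.nodup_singleton 1) hbase hpw
      (fun pe hpe => by
        obtain ⟨a, b, c⟩ := hprops pe hpe
        refine ⟨a, b, c, ?_⟩
        intro hc
        have := Int.le_of_dvd (by norm_num) hc
        omega)
    have hmemA' : ∀ x, x ∈ ((pyFactor n).foldl (fun divs pe =>
        divs.foldl (fun new_divs d =>
          ((PySem.List.pyRange 0 (2 * pe.2 + 1) 1).foldl
            (fun (st : List Int × Int) _i => (st.1 ++ [d * st.2], st.2 * pe.1))
            (new_divs, 1)).1) []) [1]) ↔ 1 ≤ x ∧ x ∣ n * n := by
      intro x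
      rw [hmemA x, hprod, one_mul]
    have hnm : (1:Int) ≤ n * n := by nlinarith
    rw [divisors_of_square, divisors_of_square_alt, if_neg hn]
    have hAeq : PySem.List.sorted ((pyFactor n).foldl (fun divs pe =>
        divs.foldl (fun new_divs d =>
          ((PySem.List.pyRange 0 (2 * pe.2 + 1) 1).foldl
            (fun (st : List Int × Int) _i => (st.1 ++ [d * st.2], st.2 * pe.1))
            (new_divs, 1)).1) []) [1]) (fun x => x) false = pvCanon (n * n) :=
      sorted_eq_pvCanon (n * n) hnm _ hndA hmemA'
    have hmemB : ∀ x, x ∈ PySem.Set.ofList ((pvDivLoop n 1 []).flatMap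
        (fun a => (pvDivLoop n 1 []).map (fun b => a * b))) ↔ 1 ≤ x ∧ x ∣ n * n := by
      intro x
      rw [PySem.Set.mem_ofList]
      rw [← mem_products_iff n hn2 x]
      simp only [List.mem_flatMap, List.mem_map]
      constructor
      · rintro ⟨a, ha, b, hb, rfl⟩
        exact ⟨a, (pvDivLoop_full n (by omega) a).mp ha,
               b, (pvDivLoop_full n (by omega) b).mp hb, rfl⟩
      · rintro ⟨a, ha, b, hb, rfl⟩
        exact ⟨a, (pvDivLoop_full n (by omega) a).mpr ha,
               b, (pvDivLoop_full n (by omega) b).mpr hb, rfl⟩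
    have hBeq : PySem.List.sorted (PySem.Set.ofList ((pvDivLoop n 1 []).flatMap
        (fun a => (pvDivLoop n 1 []).map (fun b => a * b)))) (fun x => x) false
        = pvCanon (n * n) :=
      sorted_eq_pvCanon (n * n) hnm _ (PySem.Set.nodup_ofList _) hmemB
    rw [hAeq, hBeq]

-- ===== VERDICT (by name: the statement is the Claim_ definition above) =====
theorem divisors_of_square_spec : Claim_equal_divisors_of_square := by
  intro n _
  exact main_eq n
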